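-- pv_equiv track=rewrite | github.com/figmentc/HitoriSolver-Python | hitori_csp.py | filter_row_or_col
-- ===== SOURCE A (Python) =====
-- def filter_row_or_col(perm_list):
--     ret = []
--
--     for perm in perm_list:
--
--         conflict = False
--         for i,val in enumerate(perm):
--             if val <0 or val > len(perm):
--                 conflict = True
--             if val == 0:
--
--                 if i > 0 and perm[i-1] == 0:
--                     conflict = True
--                     break
--                 if i < len(perm)-1 and perm[i+1] == 0:
--                     conflict = True
--                     break
--             else:
--                 if i < len(perm)-1:
--                     for val2_i in range(i+1, len(perm)):
--                         val2 = perm[val2_i]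
--                         if val == val2:
--                             conflict = True
--                             break
--             if(conflict):
--                 break
--         if not conflict:
--             ret.append(tuple(perm))
--
--     return ret
-- ===== SOURCE B (Python) =====
-- def filter_row_or_col(perm_list):
--     ret = []
--     for perm in perm_list:
--         n = len(perm)
--         bad_range = any(v < 0 or v > n for v in perm)
--         adjacent_zeros = any(perm[i] == 0 and perm[i + 1] == 0 for i in range(n - 1))
--         nonzeros = [v for v in perm if v != 0]
--         dup_nonzero = len(nonzeros) != len(set(nonzeros))
--         if not (bad_range or adjacent_zeros or dup_nonzero):
--             ret.append(tuple(perm))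
--     return ret
-- ===== Notes on version B (the rewrite author's own statement) =====
-- stated objective: simpler
-- what changed: A's single interleaved per-permutation scan with nested duplicate rescans and break-based early exit is replaced by three independent whole-list passes: a range check, an adjacent-zeros check, and a duplicate-nonzero check done by comparing the nonzero sublist's length with its set's size (no early exit, no nested rescan).
import Mathlib
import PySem

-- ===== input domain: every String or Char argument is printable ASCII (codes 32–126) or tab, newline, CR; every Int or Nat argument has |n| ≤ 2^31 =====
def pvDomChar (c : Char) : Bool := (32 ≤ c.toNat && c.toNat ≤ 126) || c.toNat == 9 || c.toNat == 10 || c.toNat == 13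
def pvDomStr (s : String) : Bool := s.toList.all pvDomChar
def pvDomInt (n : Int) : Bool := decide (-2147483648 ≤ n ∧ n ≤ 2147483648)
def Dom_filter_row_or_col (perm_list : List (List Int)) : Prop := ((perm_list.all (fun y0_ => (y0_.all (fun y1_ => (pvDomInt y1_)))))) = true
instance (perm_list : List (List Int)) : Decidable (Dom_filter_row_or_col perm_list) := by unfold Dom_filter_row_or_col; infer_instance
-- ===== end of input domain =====

-- B replaces A's single interleaved scan-with-breaks per permutation by three independent
-- whole-list passes (range check, adjacent-zeros check, duplicate-nonzero check via a set);
-- objective: simpler. (Python A returns tuples, so does B; rows are List Int here.)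

-- ===== PORT A =====
-- inner scan 'for val2_i in range(i+1, len(perm)): … break' — break on a pure scan = any
def dupScanA (perm : List Int) (val : Int) (i : Nat) : Bool :=
  (PySem.List.pyRange ((i : Int) + 1) (perm.length : Int)).any
    (fun j => PySem.List.pyGetD perm j 0 == val)

-- the 'conflict' value the loop body at index i establishes (range check, then the
-- val == 0 / else branch, in A's order; true = conflict set in this iteration)
def conflictAtA (perm : List Int) (i : Nat) : Bool :=
  let val := perm.getD i 0
  (decide (val < 0) || decide ((perm.length : Int) < val)) ||
  (if val == 0 then
    (decide (0 < i) && (perm.getD (i - 1) 0 == 0)) ||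
    (decide (i < perm.length - 1) && (perm.getD (i + 1) 0 == 0))
  else
    dupScanA perm val i)

-- the 'for i,val in enumerate(perm)' loop with its breaks, as recursion on the index i;
-- returning true = the loop set conflict (and broke out)
def goA (perm : List Int) (i : Nat) : Bool :=
  if i < perm.length then
    if conflictAtA perm i then true else goA perm (i + 1)
  else false
termination_by perm.length - i

def filter_row_or_col (perm_list : List (List Int)) : List (List Int) :=
  perm_list.foldl (fun ret perm => if !(goA perm 0) then ret ++ [perm] else ret) []

-- ===== PORT B =====
def badRangeB (perm : List Int) : Bool :=
  perm.any (fun v => decide (v < 0) || decide ((perm.length : Int) < v))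

def adjZeroB (perm : List Int) : Bool :=
  (List.range (perm.length - 1)).any
    (fun i => perm.getD i 0 == 0 && perm.getD (i + 1) 0 == 0)

def dupNonzeroB (perm : List Int) : Bool :=
  let nz := perm.filter (fun v => v != 0)
  nz.length != (PySem.Set.ofList nz).length

def filter_row_or_col_alt (perm_list : List (List Int)) : List (List Int) :=
  perm_list.foldl
    (fun ret perm =>
      if !(badRangeB perm || adjZeroB perm || dupNonzeroB perm) then ret ++ [perm] else ret)
    []

-- ===== PRECONDITION & SPEC =====
def Spec_filter_row_or_col (perm_list : List (List Int)) (out : List (List Int)) : Prop := out = filter_row_or_col_alt perm_list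
instance (perm_list : List (List Int)) (out : List (List Int)) : Decidable (Spec_filter_row_or_col perm_list out) := by unfold Spec_filter_row_or_col; infer_instance

-- ===== CLAIM (what is proved, stated in full; the proofs are below) =====
def Claim_equal_filter_row_or_col : Prop := ∀ (perm_list : List (List Int)), Dom_filter_row_or_col perm_list → Spec_filter_row_or_col perm_list (filter_row_or_col perm_list)

-- ===== LEMMAS AND PROOFS =====

-- the conflict condition A detects at index i, as a proposition
def badAt (perm : List Int) (i : Nat) : Prop :=
  perm.getD i 0 < 0 ∨ (perm.length : Int) < perm.getD i 0 ∨
  (perm.getD i 0 = 0 ∧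
    ((0 < i ∧ perm.getD (i - 1) 0 = 0) ∨ (i + 1 < perm.length ∧ perm.getD (i + 1) 0 = 0))) ∨
  (perm.getD i 0 ≠ 0 ∧ ∃ j, i < j ∧ j < perm.length ∧ perm.getD j 0 = perm.getD i 0)

theorem dupScanA_iff (perm : List Int) (val : Int) (i : Nat) :
    dupScanA perm val i = true ↔ ∃ j, i < j ∧ j < perm.length ∧ perm.getD j 0 = val := by
  unfold dupScanA
  rw [List.any_eq_true]
  constructor
  · rintro ⟨x, hx, hv⟩
    rw [PySem.List.mem_pyRange_one] at hx
    refine ⟨x.toNat, by omega, by omega, ?_⟩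
    have hx0 : ((x.toNat : Int)) = x := by omega
    rw [← hx0, PySem.List.pyGetD_natCast] at hv
    simpa using hv
  · rintro ⟨j, hij, hj, hv⟩
    refine ⟨(j : Int), ?_, ?_⟩
    · rw [PySem.List.mem_pyRange_one]; omega
    · rw [PySem.List.pyGetD_natCast]; simpa using hv

theorem conflictAtA_iff (perm : List Int) (i : Nat) :
    conflictAtA perm i = true ↔ badAt perm i := by
  unfold conflictAtA badAt
  by_cases h0 : perm.getD i 0 = 0
  · simp only [h0, beq_self_eq_true, if_true, Bool.or_eq_true, Bool.and_eq_true,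
      decide_eq_true_eq, beq_iff_eq]
    constructor
    · rintro ((h | h) | (⟨h1, h2⟩ | ⟨h1, h2⟩))
      · exact absurd h (lt_irrefl 0)
      · exact Or.inr (Or.inl h)
      · exact Or.inr (Or.inr (Or.inl ⟨by simp, Or.inl ⟨h1, h2⟩⟩))
      · exact Or.inr (Or.inr (Or.inl ⟨by simp, Or.inr ⟨by omega, h2⟩⟩))
    · rintro (h | h | ⟨_, (⟨h1, h2⟩ | ⟨h1, h2⟩)⟩ | ⟨h1, _⟩)
      · exact absurd h (lt_irrefl 0)
      · exact Or.inl (Or.inr h)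
      · exact Or.inr (Or.inl ⟨h1, h2⟩)
      · exact Or.inr (Or.inr ⟨by omega, h2⟩)
      · exact absurd rfl h1
  · simp only [beq_iff_eq, h0, if_false, Bool.or_eq_true, decide_eq_true_eq, dupScanA_iff]
    constructor
    · rintro ((h | h) | h)
      · exact Or.inl h
      · exact Or.inr (Or.inl h)
      · exact Or.inr (Or.inr (Or.inr ⟨by simpa [List.getD] using h0, h⟩))
    · rintro (h | h | ⟨h1, _⟩ | ⟨_, h⟩)
      · exact Or.inl (Or.inl h)
      · exact Or.inl (Or.inr h)
      · exact h1.elim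
      · exact Or.inr h

theorem goA_iff (perm : List Int) (i : Nat) :
    goA perm i = true ↔ ∃ j, i ≤ j ∧ j < perm.length ∧ badAt perm j := by
  have H : ∀ k i, perm.length - i ≤ k →
      (goA perm i = true ↔ ∃ j, i ≤ j ∧ j < perm.length ∧ badAt perm j) := by
    intro k
    induction k with
    | zero =>
      intro i hk
      rw [goA]
      simp only [show ¬ (i < perm.length) by omega, if_false]
      constructor
      · intro h; exact absurd h (by simp)
      · rintro ⟨j, h1, h2, _⟩; omega
    | succ k ih =>
      intro i hk
      rw [goA]
      by_cases hi : i < perm.length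
      · simp only [hi, if_true]
        have hrec := ih (i + 1) (by omega)
        by_cases hc : badAt perm i
        · rw [if_pos ((conflictAtA_iff perm i).mpr hc)]
          simp only [true_iff]
          exact ⟨i, le_refl _, hi, hc⟩
        · rw [if_neg (fun h => hc ((conflictAtA_iff perm i).mp h)), hrec]
          constructor
          · rintro ⟨j, h1, h2, h3⟩; exact ⟨j, by omega, h2, h3⟩
          · rintro ⟨j, h1, h2, h3⟩
            rcases Nat.eq_or_lt_of_le h1 with h | h
            · subst h; exact absurd h3 hc
            · exact ⟨j, by omega, h2, h3⟩
      · simp only [hi, if_false]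
        constructor
        · intro h; exact absurd h (by simp)
        · rintro ⟨j, h1, h2, _⟩; omega
  exact H (perm.length - i) i (le_refl _)

theorem badRangeB_iff (perm : List Int) :
    badRangeB perm = true ↔
      ∃ i, i < perm.length ∧ (perm.getD i 0 < 0 ∨ (perm.length : Int) < perm.getD i 0) := by
  unfold badRangeB
  rw [List.any_eq_true]
  constructor
  · rintro ⟨v, hv, hp⟩
    obtain ⟨i, hi, rfl⟩ := List.mem_iff_getElem.mp hv
    refine ⟨i, hi, ?_⟩
    rw [List.getD_eq_getElem perm 0 hi]
    simpa using hp
  · rintro ⟨i, hi, hp⟩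
    refine ⟨perm[i], List.getElem_mem hi, ?_⟩
    rw [List.getD_eq_getElem perm 0 hi] at hp
    simpa using hp

theorem adjZeroB_iff (perm : List Int) :
    adjZeroB perm = true ↔
      ∃ i, i + 1 < perm.length ∧ perm.getD i 0 = 0 ∧ perm.getD (i + 1) 0 = 0 := by
  unfold adjZeroB
  rw [List.any_eq_true]
  constructor
  · rintro ⟨i, hi, hp⟩
    rw [List.mem_range] at hi
    simp only [Bool.and_eq_true, beq_iff_eq] at hp
    exact ⟨i, by omega, hp.1, hp.2⟩
  · rintro ⟨i, hi, h1, h2⟩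
    refine ⟨i, List.mem_range.mpr (by omega), ?_⟩
    simp only [Bool.and_eq_true, beq_iff_eq]
    exact ⟨h1, h2⟩

theorem ofList_length_lt (xs : List Int) (h : ¬ xs.Nodup) :
    (PySem.Set.ofList xs).length < xs.length := by
  induction xs with
  | nil => exact absurd List.nodup_nil h
  | cons x xs ih =>
    rw [PySem.Set.ofList_cons]
    simp only [List.length_cons]
    by_cases hx : x ∈ xs
    · have hmem : x ∈ PySem.Set.ofList xs := by rw [PySem.Set.mem_ofList]; exact hx
      have hlt : ((PySem.Set.ofList xs).discard x).length < (PySem.Set.ofList xs).length := by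
        unfold PySem.Set.discard
        apply List.length_filter_lt_length_iff_exists.mpr
        exact ⟨x, hmem, by simp⟩
      have := PySem.Set.length_ofList_le xs
      omega
    · have hxs : ¬ xs.Nodup := by
        intro hn
        exact h (List.nodup_cons.mpr ⟨hx, hn⟩)
      have hle : ((PySem.Set.ofList xs).discard x).length ≤ (PySem.Set.ofList xs).length := by
        unfold PySem.Set.discard
        exact List.length_filter_le _ _
      have := ih hxs
      omega

theorem ofList_length_eq_iff (xs : List Int) :
    (PySem.Set.ofList xs).length = xs.length ↔ xs.Nodup := by
  constructor
  · intro h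
    by_contra hn
    have := ofList_length_lt xs hn
    omega
  · intro h
    exact congrArg List.length (PySem.Set.ofList_eq_self_of_nodup xs h)

theorem dupNonzeroB_iff (perm : List Int) :
    dupNonzeroB perm = true ↔ ∃ x, x ≠ 0 ∧ 2 ≤ perm.count x := by
  unfold dupNonzeroB
  simp only [bne_iff_ne, ne_eq]
  constructor
  · intro h
    have hn : ¬ (perm.filter (fun v => v != 0)).Nodup := by
      intro hnd
      exact h ((ofList_length_eq_iff _).mpr hnd).symm
    obtain ⟨x, hdup⟩ := List.exists_duplicate_iff_not_nodup.mpr hn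
    have hx0 : x ≠ 0 := by
      have hm : x ∈ perm.filter (fun v => v != 0) := hdup.mem
      simp only [List.mem_filter, bne_iff_ne, ne_eq] at hm
      exact hm.2
    refine ⟨x, hx0, ?_⟩
    have hc := List.duplicate_iff_two_le_count.mp hdup
    rwa [List.count_filter (by simpa using hx0)] at hc
  · rintro ⟨x, hx0, hc⟩
    intro h
    have hnd : (perm.filter (fun v => v != 0)).Nodup := (ofList_length_eq_iff _).mp h.symm
    have : List.Duplicate x (perm.filter (fun v => v != 0)) := by
      rw [List.duplicate_iff_two_le_count, List.count_filter (by simpa using hx0)]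
      exact hc
    exact List.exists_duplicate_iff_not_nodup.mp ⟨x, this⟩ hnd

theorem key (perm : List Int) :
    goA perm 0 = (badRangeB perm || adjZeroB perm || dupNonzeroB perm) := by
  rw [Bool.eq_iff_iff]
  rw [goA_iff]
  simp only [Bool.or_eq_true, badRangeB_iff, adjZeroB_iff, dupNonzeroB_iff]
  constructor
  · rintro ⟨j, -, hj, hbad⟩
    unfold badAt at hbad
    rcases hbad with h | h | ⟨h0, (⟨h1, h2⟩ | ⟨h1, h2⟩)⟩ | ⟨h0, j2, hj2, hj2n, hv⟩
    · exact Or.inl (Or.inl ⟨j, hj, Or.inl h⟩)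
    · exact Or.inl (Or.inl ⟨j, hj, Or.inr h⟩)
    · refine Or.inl (Or.inr ⟨j - 1, by omega, h2, ?_⟩)
      rw [show j - 1 + 1 = j by omega]; exact h0
    · exact Or.inl (Or.inr ⟨j, h1, h0, h2⟩)
    · refine Or.inr ⟨perm.getD j 0, h0, ?_⟩
      have hdup : List.Duplicate (perm.getD j 0) perm := by
        rw [List.duplicate_iff_exists_distinct_get]
        refine ⟨⟨j, hj⟩, ⟨j2, hj2n⟩, hj2, ?_, ?_⟩
        · rw [List.getD_eq_getElem perm 0 hj]
          simp [List.get_eq_getElem]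
        · rw [← hv, List.getD_eq_getElem perm 0 hj2n]
          simp [List.get_eq_getElem]
      exact List.duplicate_iff_two_le_count.mp hdup
  · rintro ((⟨i, hi, hp⟩ | ⟨i, hi, h1, h2⟩) | ⟨x, hx0, hc⟩)
    · refine ⟨i, Nat.zero_le _, hi, ?_⟩
      unfold badAt
      rcases hp with h | h
      · exact Or.inl h
      · exact Or.inr (Or.inl h)
    · refine ⟨i, Nat.zero_le _, by omega, ?_⟩
      unfold badAt
      exact Or.inr (Or.inr (Or.inl ⟨h1, Or.inr ⟨hi, h2⟩⟩))
    · obtain ⟨n, m, hnm, hxn, hxm⟩ := List.duplicate_iff_exists_distinct_get.mp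
        (List.duplicate_iff_two_le_count.mpr hc)
      refine ⟨n, Nat.zero_le _, n.isLt, ?_⟩
      unfold badAt
      have hgn : perm.getD (↑n) 0 = x := by
        rw [List.getD_eq_getElem perm 0 n.isLt]
        simp only [List.get_eq_getElem] at hxn
        exact hxn.symm
      refine Or.inr (Or.inr (Or.inr ⟨by rw [hgn]; exact hx0, m, hnm, m.isLt, ?_⟩))
      rw [hgn, List.getD_eq_getElem perm 0 m.isLt]
      simp only [List.get_eq_getElem] at hxm
      exact hxm.symm

-- ===== VERDICT (by name: the statement is the Claim_ definition above) =====
theorem filter_row_or_col_spec : Claim_equal_filter_row_or_col := by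
  intro perm_list _
  unfold Spec_filter_row_or_col filter_row_or_col filter_row_or_col_alt
  have hf : (fun (ret : List (List Int)) perm => if !(goA perm 0) then ret ++ [perm] else ret)
      = (fun (ret : List (List Int)) perm =>
          if !(badRangeB perm || adjZeroB perm || dupNonzeroB perm) then ret ++ [perm] else ret) := by
    funext ret perm
    rw [key perm]
  rw [hf]
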